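-- pv_equiv track=rewrite | github.com/kumarai/crazy-request-ai | backend/app/indexing/git_client.py | apply_directory_filter
-- ===== SOURCE A (Python) =====
-- def apply_directory_filter(
--     files: list[str], rules: list[str]
-- ) -> list[str]:
--     if rules == ["*"]:
--         return files
--
--     include_rules = [r for r in rules if not r.startswith("!")]
--     exclude_rules = [r[1:] for r in rules if r.startswith("!")]
--
--     result = []
--     for f in files:
--         excluded = any(
--             f"/{ex}/" in f"/{f}" or f.startswith(f"{ex}/")
--             for ex in exclude_rules
--         )
--         if excluded:
--             continue
--
--         if include_rules:
--             included = any(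
--                 f.startswith(f"{inc}/") or f"/{inc}/" in f"/{f}"
--                 for inc in include_rules
--             )
--             if not included:
--                 continue
--
--         result.append(f)
--
--     return result
-- ===== SOURCE B (Python) =====
-- def apply_directory_filter(files: list[str], rules: list[str]) -> list[str]:
--     if rules == ["*"]:
--         return files
--
--     include_rules = [r for r in rules if not r.startswith("!")]
--     exclude_rules = [r[1:] for r in rules if r.startswith("!")]
--
--     def matches(rule, f):
--         return f"/{rule}/" in f"/{f}" or f.startswith(f"{rule}/")
--
--     excluded = set()
--     for ex in exclude_rules:
--         for f in files:
--             if matches(ex, f):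
--                 excluded.add(f)
--
--     included = set()
--     for inc in include_rules:
--         for f in files:
--             if matches(inc, f):
--                 included.add(f)
--
--     return [f for f in files
--             if f not in excluded and (not include_rules or f in included)]
-- ===== Notes on version B (the rewrite author's own statement) =====
-- stated objective: alternative
-- what changed: Replaces A's per-file scan of all rules (with an any() over rules inside the file loop) by rule-outer index building: each rule scans the files once to populate excluded/included sets, and one final pass over the original files list filters by set membership.
import Mathlib
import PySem

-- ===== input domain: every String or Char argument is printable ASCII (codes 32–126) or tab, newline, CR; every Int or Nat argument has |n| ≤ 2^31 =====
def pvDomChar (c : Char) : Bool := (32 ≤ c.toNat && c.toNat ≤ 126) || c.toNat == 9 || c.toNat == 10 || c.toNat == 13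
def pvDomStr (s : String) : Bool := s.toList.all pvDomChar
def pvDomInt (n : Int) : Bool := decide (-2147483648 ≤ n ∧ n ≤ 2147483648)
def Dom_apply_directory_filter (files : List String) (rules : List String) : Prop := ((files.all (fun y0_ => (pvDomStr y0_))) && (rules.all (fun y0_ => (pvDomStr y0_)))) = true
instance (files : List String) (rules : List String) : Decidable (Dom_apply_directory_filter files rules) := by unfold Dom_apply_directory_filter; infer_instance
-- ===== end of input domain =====

-- B replaces A's per-file scan of all rules by rule-outer passes that build excluded/included
-- sets, then one final pass over the original files list filters by set membership (alternative
-- decomposition, same cost).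

-- ===== PORT A =====
def apply_directory_filter (files : List String) (rules : List String) : List String :=
  if rules = ["*"] then files
  else
    let include_rules := rules.filter (fun r => !(PySem.Str.startswith r "!"))
    let exclude_rules := (rules.filter (fun r => PySem.Str.startswith r "!")).map
      (fun r => PySem.Str.slice r (some 1) none)
    files.foldl (fun result f =>
      let excluded := exclude_rules.any (fun ex =>
        PySem.Str.isIn ("/" ++ ex ++ "/") ("/" ++ f) || PySem.Str.startswith f (ex ++ "/"))
      if excluded then result
      else if !include_rules.isEmpty &&
              !(include_rules.any (fun inc =>
                  PySem.Str.startswith f (inc ++ "/") || PySem.Str.isIn ("/" ++ inc ++ "/") ("/" ++ f)))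
        then result
      else result ++ [f]) []

-- ===== PORT B =====
-- B's helper `matches(rule, f)`
def pvMatches (rule f : String) : Bool :=
  PySem.Str.isIn ("/" ++ rule ++ "/") ("/" ++ f) || PySem.Str.startswith f (rule ++ "/")

-- B's rule-outer set building: for each rule, add every matching file to the set
def pvBuildSet (rules files : List String) (s : PySem.Set String) : PySem.Set String :=
  rules.foldl (fun s r =>
    files.foldl (fun s f => if pvMatches r f then PySem.Set.add s f else s) s) s

def apply_directory_filter_alt (files : List String) (rules : List String) : List String :=
  if rules = ["*"] then files
  else
    let include_rules := rules.filter (fun r => !(PySem.Str.startswith r "!"))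
    let exclude_rules := (rules.filter (fun r => PySem.Str.startswith r "!")).map
      (fun r => PySem.Str.slice r (some 1) none)
    let excluded := pvBuildSet exclude_rules files PySem.Set.empty
    let included := pvBuildSet include_rules files PySem.Set.empty
    files.filter (fun f =>
      !(PySem.Set.contains excluded f) &&
      (include_rules.isEmpty || PySem.Set.contains included f))

-- ===== PRECONDITION & SPEC =====
def Spec_apply_directory_filter (files : List String) (rules : List String) (out : List String) : Prop := out = apply_directory_filter_alt files rules
instance (files : List String) (rules : List String) (out : List String) : Decidable (Spec_apply_directory_filter files rules out) := by unfold Spec_apply_directory_filter; infer_instance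

-- ===== CLAIM (what is proved, stated in full; the proofs are below) =====
def Claim_equal_apply_directory_filter : Prop := ∀ (files : List String) (rules : List String), Dom_apply_directory_filter files rules → Spec_apply_directory_filter files rules (apply_directory_filter files rules)

-- ===== LEMMAS AND PROOFS =====

-- membership in the inner (one-rule) pass of pvBuildSet
theorem mem_buildSet_inner (r : String) (files : List String) (s : PySem.Set String) (f : String) :
    f ∈ files.foldl (fun s g => if pvMatches r g then PySem.Set.add s g else s) s ↔
      f ∈ s ∨ (f ∈ files ∧ pvMatches r f = true) := by
  induction files generalizing s with
  | nil => simp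
  | cons g t ih =>
    simp only [List.foldl_cons, ih, List.mem_cons]
    split
    · next h =>
      rw [PySem.Set.mem_add]
      constructor
      · rintro ((hs | rfl) | ht)
        · exact Or.inl hs
        · exact Or.inr ⟨Or.inl rfl, h⟩
        · exact Or.inr ⟨Or.inr ht.1, ht.2⟩
      · rintro (hs | ⟨(rfl | ht), hm⟩)
        · exact Or.inl (Or.inl hs)
        · exact Or.inl (Or.inr rfl)
        · exact Or.inr ⟨ht, hm⟩
    · next h =>
      constructor
      · rintro (hs | ht)
        · exact Or.inl hs
        · exact Or.inr ⟨Or.inr ht.1, ht.2⟩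
      · rintro (hs | ⟨(rfl | ht), hm⟩)
        · exact Or.inl hs
        · exact absurd hm h
        · exact Or.inr ⟨ht, hm⟩

-- membership in the full rule-outer set build
theorem mem_buildSet (rules files : List String) (s : PySem.Set String) (f : String) :
    f ∈ pvBuildSet rules files s ↔
      f ∈ s ∨ (f ∈ files ∧ ∃ r ∈ rules, pvMatches r f = true) := by
  induction rules generalizing s with
  | nil => simp [pvBuildSet]
  | cons r t ih =>
    simp only [pvBuildSet, List.foldl_cons] at *
    rw [ih, mem_buildSet_inner]
    constructor
    · rintro ((hs | ⟨hf, hm⟩) | ⟨hf, r', hr', hm⟩)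
      · exact Or.inl hs
      · exact Or.inr ⟨hf, r, List.mem_cons_self, hm⟩
      · exact Or.inr ⟨hf, r', List.mem_cons_of_mem _ hr', hm⟩
    · rintro (hs | ⟨hf, r', hr', hm⟩)
      · exact Or.inl (Or.inl hs)
      · rcases List.mem_cons.mp hr' with rfl | hr'
        · exact Or.inl (Or.inr ⟨hf, hm⟩)
        · exact Or.inr ⟨hf, r', hr', hm⟩

-- for f drawn from files, set membership computes exactly the any() A evaluates
theorem contains_buildSet_of_mem (rules files : List String) (f : String) (hf : f ∈ files) :
    PySem.Set.contains (pvBuildSet rules files PySem.Set.empty) f =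
      rules.any (fun r => pvMatches r f) := by
  rcases h : rules.any (fun r => pvMatches r f) with _ | _
  · simp only [List.any_eq_false] at h
    refine Bool.eq_false_iff.mpr (fun hc => ?_)
    rcases (mem_buildSet rules files PySem.Set.empty f).mp ((PySem.Set.contains_iff _ _).mp hc) with hs | ⟨_, r, hr, hm⟩
    · simp [PySem.Set.empty] at hs
    · exact absurd hm (by simpa using h r hr)
  · rcases List.any_eq_true.mp h with ⟨r, hr, hm⟩
    exact (PySem.Set.contains_iff _ _).mpr ((mem_buildSet rules files PySem.Set.empty f).mpr
      (Or.inr ⟨hf, r, hr, by simpa using hm⟩))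

-- A's accumulate-or-skip loop is a filter
theorem loopA_eq_filter (p q : String → Bool) (files : List String) (acc : List String) :
    files.foldl (fun result f =>
        if p f then result else if q f then result else result ++ [f]) acc =
      acc ++ files.filter (fun f => !p f && !q f) := by
  induction files generalizing acc with
  | nil => simp
  | cons f t ih =>
    simp only [List.foldl_cons, List.filter_cons]
    by_cases hp : p f
    · simp [hp, ih]
    · by_cases hq : q f
      · simp [hp, hq, ih]
      · simp [hp, hq, ih]

-- ===== VERDICT (by name: the statement is the Claim_ definition above) =====
theorem apply_directory_filter_spec : Claim_equal_apply_directory_filter := by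
  intro files rules _
  unfold Spec_apply_directory_filter apply_directory_filter apply_directory_filter_alt
  by_cases hstar : rules = ["*"]
  · simp [hstar]
  · simp only [hstar, if_false]
    rw [loopA_eq_filter, List.nil_append]
    apply List.filter_congr
    intro f hf
    rw [contains_buildSet_of_mem _ _ _ hf, contains_buildSet_of_mem _ _ _ hf]
    set inc := rules.filter (fun r => !(PySem.Str.startswith r "!")) with hinc
    set exc := (rules.filter (fun r => PySem.Str.startswith r "!")).map
      (fun r => PySem.Str.slice r (some 1) none) with hexc
    have hmatchE : (fun ex => PySem.Str.isIn ("/" ++ ex ++ "/") ("/" ++ f) ||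
        PySem.Str.startswith f (ex ++ "/")) = (fun r => pvMatches r f) := by
      funext r; simp [pvMatches]
    have hmatchI : (fun i => PySem.Str.startswith f (i ++ "/") ||
        PySem.Str.isIn ("/" ++ i ++ "/") ("/" ++ f)) = (fun r => pvMatches r f) := by
      funext r; simp [pvMatches, Bool.or_comm]
    rw [hmatchE, hmatchI]
    cases he : exc.any (fun r => pvMatches r f) <;>
      cases hi : inc.any (fun r => pvMatches r f) <;>
        cases hni : inc.isEmpty <;> simp
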